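-- pv_equiv track=rewrite | github.com/robert-portelli/advent-of-code | 2023/15_lens_library/aoc202315.py | hash_algorithm
-- ===== SOURCE A (Python) =====
-- def hash_algorithm(input_str: str) -> int:
--     current_value = 0
--
--     for char in input_str:
--         ascii_code = ord(char)
--         current_value += ascii_code
--         current_value *= 17
--         current_value %= 256
--
--     return current_value
-- ===== SOURCE B (Python) =====
-- def hash_algorithm(input_str: str) -> int:
--     # weighted-sum form: value = (sum ord(c_i) * 17^(n-i)) mod 256, one final mod
--     total = 0
--     e = len(input_str)
--     for char in input_str:
--         total += ord(char) * pow(17, e, 256)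
--         e -= 1
--     return total % 256
-- ===== Notes on version B (the rewrite author's own statement) =====
-- stated objective: alternative
-- what changed: B replaces A's running (add, *17, mod) state update per character by the closed-form weighted sum sum(ord(c_i)*17^(n-i) mod 256) with a single final mod 256.
import Mathlib
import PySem

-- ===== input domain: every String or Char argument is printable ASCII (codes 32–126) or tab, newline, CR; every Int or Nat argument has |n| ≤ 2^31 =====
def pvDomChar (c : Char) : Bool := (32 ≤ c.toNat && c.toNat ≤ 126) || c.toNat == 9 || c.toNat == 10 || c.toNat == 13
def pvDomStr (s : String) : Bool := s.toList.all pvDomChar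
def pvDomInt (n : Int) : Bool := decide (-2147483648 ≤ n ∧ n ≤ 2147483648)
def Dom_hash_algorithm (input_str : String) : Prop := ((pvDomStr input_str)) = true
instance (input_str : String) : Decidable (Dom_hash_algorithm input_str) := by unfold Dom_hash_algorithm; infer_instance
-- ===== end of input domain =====

-- B computes the same hash as the closed-form weighted sum Σ ord(c_i)·17^(n-i) (mod 256) in one pass,
-- instead of A's per-character (add, *17, mod) state update; same O(n) cost, different decomposition.

-- ===== PORT A =====
def hash_algorithm (input_str : String) : Int :=
  input_str.toList.foldl
    (fun current_value ch => PySem.Int.mod ((current_value + (ch.toNat : Int)) * 17) 256) 0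

-- ===== PORT B =====
def hash_algorithm_alt (input_str : String) : Int :=
  let r := input_str.toList.foldl
    (fun (st : Int × Nat) ch =>
      (st.1 + (ch.toNat : Int) * PySem.Int.mod ((17 : Int) ^ st.2) 256, st.2 - 1))
    (0, input_str.toList.length)
  PySem.Int.mod r.1 256

-- ===== PRECONDITION & SPEC =====
def Spec_hash_algorithm (input_str : String) (out : Int) : Prop := out = hash_algorithm_alt input_str
instance (input_str : String) (out : Int) : Decidable (Spec_hash_algorithm input_str out) := by unfold Spec_hash_algorithm; infer_instance

-- ===== CLAIM (what is proved, stated in full; the proofs are below) =====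
def Claim_equal_hash_algorithm : Prop := ∀ (input_str : String), Dom_hash_algorithm input_str → Spec_hash_algorithm input_str (hash_algorithm input_str)

-- ===== LEMMAS AND PROOFS =====

theorem pvMod256 (a : Int) : PySem.Int.mod a 256 = a % 256 :=
  PySem.Int.mod_eq_emod_of_pos (by norm_num)

-- the accumulator invariant relating A's threaded-mod fold to B's weighted-sum fold
theorem pvKey : ∀ (l : List Char) (a t : Int),
    l.foldl (fun cv ch => ((cv + (ch.toNat : Int)) * 17) % 256) (a % 256)
      = ((l.foldl (fun (st : Int × Nat) ch =>
            (st.1 + (ch.toNat : Int) * ((17 : Int) ^ st.2 % 256), st.2 - 1)) (t, l.length)).1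
          - t + a * 17 ^ l.length) % 256 := by
  intro l
  induction l with
  | nil => intro a t; simp
  | cons c l ih =>
    intro a t
    have h1 : (((a % 256) + (c.toNat : Int)) * 17) % 256
        = (((a + (c.toNat : Int)) * 17) % 256) := by
      have : Int.ModEq 256 (a % 256) a := Int.emod_emod_of_dvd a dvd_rfl
      exact ((this.add_right _).mul_right 17)
    simp only [List.foldl_cons, List.length_cons, Nat.add_sub_cancel]
    rw [h1, ih ((a + (c.toNat : Int)) * 17) (t + (c.toNat : Int) * ((17 : Int) ^ (l.length + 1) % 256))]
    have hm : Int.ModEq 256 ((17 : Int) ^ (l.length + 1) % 256) ((17 : Int) ^ (l.length + 1)) :=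
      Int.emod_emod_of_dvd _ dvd_rfl
    have : Int.ModEq 256
        ((l.foldl (fun (st : Int × Nat) ch =>
            (st.1 + (ch.toNat : Int) * ((17 : Int) ^ st.2 % 256), st.2 - 1))
          (t + (c.toNat : Int) * ((17 : Int) ^ (l.length + 1) % 256), l.length)).1
          - (t + (c.toNat : Int) * ((17 : Int) ^ (l.length + 1) % 256)) + (a + (c.toNat : Int)) * 17 * 17 ^ l.length)
        ((l.foldl (fun (st : Int × Nat) ch =>
            (st.1 + (ch.toNat : Int) * ((17 : Int) ^ st.2 % 256), st.2 - 1))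
          (t + (c.toNat : Int) * ((17 : Int) ^ (l.length + 1) % 256), l.length)).1
          - t + a * 17 ^ (l.length + 1)) := by
      have hexp : (a + (c.toNat : Int)) * 17 * 17 ^ l.length
          = a * 17 ^ (l.length + 1) + (c.toNat : Int) * 17 ^ (l.length + 1) := by ring
      rw [hexp]
      have hgoal : ∀ X : Int, Int.ModEq 256
          (X - (t + (c.toNat : Int) * ((17 : Int) ^ (l.length + 1) % 256))
            + (a * 17 ^ (l.length + 1) + (c.toNat : Int) * 17 ^ (l.length + 1)))
          (X - t + a * 17 ^ (l.length + 1)) := by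
        intro X
        have h2 : Int.ModEq 256 ((c.toNat : Int) * ((17 : Int) ^ (l.length + 1) % 256))
            ((c.toNat : Int) * (17 : Int) ^ (l.length + 1)) := hm.mul_left _
        have hd : Int.ModEq 256
            ((c.toNat : Int) * (17 : Int) ^ (l.length + 1)
              - (c.toNat : Int) * ((17 : Int) ^ (l.length + 1) % 256)) 0 := by
          have := h2.symm.sub (Int.ModEq.refl ((c.toNat : Int) * ((17 : Int) ^ (l.length + 1) % 256)))
          simpa using this
        calc X - (t + (c.toNat : Int) * ((17 : Int) ^ (l.length + 1) % 256))
              + (a * 17 ^ (l.length + 1) + (c.toNat : Int) * 17 ^ (l.length + 1))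
            = (X - t + a * 17 ^ (l.length + 1)) + ((c.toNat : Int) * (17 : Int) ^ (l.length + 1)
                - (c.toNat : Int) * ((17 : Int) ^ (l.length + 1) % 256)) := by ring
          _ ≡ (X - t + a * 17 ^ (l.length + 1)) + 0 [ZMOD 256] := (Int.ModEq.refl _).add hd
          _ = X - t + a * 17 ^ (l.length + 1) := by ring
      exact hgoal _
    exact this

-- ===== VERDICT (by name: the statement is the Claim_ definition above) =====
theorem hash_algorithm_spec : Claim_equal_hash_algorithm := by
  intro s _
  unfold Spec_hash_algorithm hash_algorithm hash_algorithm_alt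
  simp only [pvMod256]
  have h := pvKey s.toList 0 0
  simpa using h
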